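-- pv_equiv track=rewrite | github.com/hwasungmars/qi-python | minimum_diff_sum.py | optimised_min
-- ===== SOURCE A (Python) =====
-- import itertools
--
-- def abs_dist(a, b, c):
--     """Given a, b, c find the abs distance."""
--     return abs(a-b) + abs(b-c) + abs(c-a)
--
-- def optimised_min(a1, a2, a3):
--     """Optimise the brute force search by sorting a3."""
--     a3.sort()
--     min_so_far = None
--     for x, y in itertools.product(a1, a2):
--         for i in range(len(a3)):
--             dist = abs_dist(x, y, a3[i])
--             if not min_so_far or dist < abs_dist(*min_so_far):
--                 min_so_far = (x, y, a3[i])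
--             elif i > 0 and abs_dist(x, y, a3[i-1]) < abs_dist(x, y, a3[i]):
--                 break
--
--     return min_so_far
-- ===== SOURCE B (Python) =====
-- def abs_dist(a, b, c):
--     """Given a, b, c find the abs distance."""
--     return abs(a-b) + abs(b-c) + abs(c-a)
--
-- def _bisect_left(s, v):
--     lo, hi = 0, len(s)
--     while lo < hi:
--         mid = (lo + hi) // 2
--         if s[mid] < v:
--             lo = mid + 1
--         else:
--             hi = mid
--     return lo
--
-- def _best_z(x, y, s):
--     """First (smallest) minimizer of abs_dist(x, y, .) over sorted non-empty s."""
--     lo, hi = (x, y) if x <= y else (y, x)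
--     p = _bisect_left(s, lo)
--     if p < len(s) and s[p] <= hi:
--         return s[p]
--     if p == len(s):
--         return s[-1]
--     if p == 0:
--         return s[0]
--     zl, zr = s[p - 1], s[p]
--     return zl if abs_dist(x, y, zl) <= abs_dist(x, y, zr) else zr
--
-- def optimised_min(a1, a2, a3):
--     """Binary search on sorted a3 for the best third element of each pair."""
--     a3.sort()
--     best = None
--     if a3:
--         for x in a1:
--             for y in a2:
--                 z = _best_z(x, y, a3)
--                 if best is None or abs_dist(x, y, z) < abs_dist(*best):
--                     best = (x, y, z)
--     return best
-- ===== Notes on version B (the rewrite author's own statement) =====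
-- stated objective: faster
-- what changed: A scans sorted a3 linearly for every (x,y) pair (with a late break once the convex distance starts rising); B binary-searches sorted a3 once per pair for the first minimizer of the convex distance function, removing the inner linear scan.
import Mathlib
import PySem

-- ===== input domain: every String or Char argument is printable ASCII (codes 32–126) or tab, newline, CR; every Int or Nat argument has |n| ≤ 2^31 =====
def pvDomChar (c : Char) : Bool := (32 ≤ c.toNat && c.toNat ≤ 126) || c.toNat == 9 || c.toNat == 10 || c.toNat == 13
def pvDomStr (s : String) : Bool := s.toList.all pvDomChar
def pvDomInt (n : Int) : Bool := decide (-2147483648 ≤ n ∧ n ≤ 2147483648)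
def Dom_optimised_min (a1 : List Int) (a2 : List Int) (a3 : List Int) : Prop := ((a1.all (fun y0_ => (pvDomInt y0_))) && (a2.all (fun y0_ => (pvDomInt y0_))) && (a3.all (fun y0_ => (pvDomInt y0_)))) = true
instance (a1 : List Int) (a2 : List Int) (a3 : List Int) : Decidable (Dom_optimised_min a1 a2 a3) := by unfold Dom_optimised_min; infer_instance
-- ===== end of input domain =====

-- B replaces A's linear scan of sorted a3 per (x,y) pair by a binary search for the
-- convex minimizer (objective: faster). Both A and B sort a3 in place (same side
-- effect); the equivalence proved here is about the return value.

-- ===== PORT A =====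
-- abs_dist(a, b, c) = abs(a-b) + abs(b-c) + abs(c-a)
def absDist (a b c : Int) : Int := |a - b| + |b - c| + |c - a|

-- inner `for i in range(len(a3))` loop of A, with its early `break`
def innerA (x y : Int) (s : List Int) (i : Nat) (m : Option (Int × Int × Int)) :
    Option (Int × Int × Int) :=
  if h : i < s.length then
    let dist := absDist x y s[i]
    match m with
    | none => innerA x y s (i + 1) (some (x, y, s[i]))
    | some t =>
      if dist < absDist t.1 t.2.1 t.2.2 then innerA x y s (i + 1) (some (x, y, s[i]))
      else if 0 < i ∧ absDist x y (s.getD (i - 1) 0) < dist then some t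
      else innerA x y s (i + 1) (some t)
  else m
termination_by s.length - i

def optimised_min (a1 : List Int) (a2 : List Int) (a3 : List Int) : Option (List Int) :=
  let s := PySem.List.sorted a3 (fun z => z) false   -- a3.sort()
  -- for x, y in itertools.product(a1, a2): inner loop
  let m := (a1.flatMap (fun x => a2.map (fun y => (x, y)))).foldl
             (fun m xy => innerA xy.1 xy.2 s 0 m) none
  m.map (fun t => [t.1, t.2.1, t.2.2])

-- ===== PORT B =====
-- the `while lo < hi` loop of _bisect_left
def bisectGo (s : List Int) (v : Int) (lo hi : Nat) : Nat :=
  if lo < hi then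
    let mid := (lo + hi) / 2
    if s.getD mid 0 < v then bisectGo s v (mid + 1) hi else bisectGo s v lo mid
  else lo
termination_by hi - lo

def bisectLeft (s : List Int) (v : Int) : Nat := bisectGo s v 0 s.length

def bestZ (x y : Int) (s : List Int) : Int :=
  let lo := if x ≤ y then x else y
  let hi := if x ≤ y then y else x
  let p := bisectLeft s lo
  if p < s.length ∧ s.getD p 0 ≤ hi then s.getD p 0
  else if p = s.length then s.getD (s.length - 1) 0     -- s[-1]
  else if p = 0 then s.getD 0 0
  else
    let zl := s.getD (p - 1) 0
    let zr := s.getD p 0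
    if absDist x y zl ≤ absDist x y zr then zl else zr

def optimised_min_alt (a1 : List Int) (a2 : List Int) (a3 : List Int) : Option (List Int) :=
  let s := PySem.List.sorted a3 (fun z => z) false   -- a3.sort()
  let best : Option (Int × Int × Int) :=
    if s = [] then none
    else
      a1.foldl (fun m x =>
        a2.foldl (fun m y =>
          let z := bestZ x y s
          match m with
          | none => some (x, y, z)
          | some t =>
            if absDist x y z < absDist t.1 t.2.1 t.2.2 then some (x, y, z) else some t) m) none
  best.map (fun t => [t.1, t.2.1, t.2.2])

-- ===== PRECONDITION & SPEC =====
def Spec_optimised_min (a1 : List Int) (a2 : List Int) (a3 : List Int) (out : Option (List Int)) : Prop := out = optimised_min_alt a1 a2 a3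
instance (a1 : List Int) (a2 : List Int) (a3 : List Int) (out : Option (List Int)) : Decidable (Spec_optimised_min a1 a2 a3 out) := by unfold Spec_optimised_min; infer_instance

-- ===== CLAIM (what is proved, stated in full; the proofs are below) =====
def Claim_equal_optimised_min : Prop := ∀ (a1 : List Int) (a2 : List Int) (a3 : List Int), Dom_optimised_min a1 a2 a3 → Spec_optimised_min a1 a2 a3 (optimised_min a1 a2 a3)

-- ===== LEMMAS AND PROOFS =====

def d3 (t : Int × Int × Int) : Int := absDist t.1 t.2.1 t.2.2

def stepF (x y : Int) (m : Option (Int × Int × Int)) (z : Int) : Option (Int × Int × Int) :=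
  match m with
  | none => some (x, y, z)
  | some t => if absDist x y z < d3 t then some (x, y, z) else some t

def fm (x y : Int) : List Int → Option Int
  | [] => none
  | z :: t =>
    match fm x y t with
    | none => some z
    | some w => if absDist x y w < absDist x y z then some w else some z

-- the "first minimizer" property of a value v of a sorted list s, for pair (x, y)
def FirstMin (x y : Int) (s : List Int) (v : Int) : Prop :=
  v ∈ s ∧ ∀ z ∈ s, absDist x y v < absDist x y z ∨ (absDist x y v = absDist x y z ∧ v ≤ z)

-- arithmetic facts about absDist
lemma conv3 (x y z1 z2 z3 : Int) (h12 : z1 ≤ z2) (h23 : z2 ≤ z3)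
    (h : absDist x y z1 < absDist x y z2) : absDist x y z2 ≤ absDist x y z3 := by
  simp only [absDist, Int.abs_eq_natAbs] at *; omega

lemma f_lt_below (x y z1 z2 : Int) (h : z1 < z2) (hx : z2 ≤ x) (hy : z2 ≤ y) :
    absDist x y z2 < absDist x y z1 := by
  simp only [absDist, Int.abs_eq_natAbs] at *; omega

lemma f_lt_above (x y z1 z2 : Int) (h : z1 < z2) (hx : x ≤ z1) (hy : y ≤ z1) :
    absDist x y z1 < absDist x y z2 := by
  simp only [absDist, Int.abs_eq_natAbs] at *; omega

lemma region_min (x y z u : Int) (h1 : x ≤ z ∨ y ≤ z) (h2 : z ≤ x ∨ z ≤ y) :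
    absDist x y z ≤ absDist x y u := by
  rcases h1 with h | h <;> rcases h2 with g | g <;>
    simp only [absDist, Int.abs_eq_natAbs] at * <;> omega

lemma region_eq (x y z u : Int) (h1 : x ≤ z ∨ y ≤ z) (h2 : z ≤ x ∨ z ≤ y)
    (h : absDist x y z = absDist x y u) : (x ≤ u ∨ y ≤ u) ∧ (u ≤ x ∨ u ≤ y) := by
  rcases h1 with h1 | h1 <;> rcases h2 with h2 | h2 <;>
    simp only [absDist, Int.abs_eq_natAbs] at * <;> omega

-- sorted lists: elementwise monotone
lemma pw_mono {s : List Int} (hs : s.Pairwise (· ≤ ·)) {i j : Nat} (hij : i ≤ j)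
    (hj : j < s.length) : s[i]'(by omega) ≤ s[j] := by
  rcases Nat.lt_or_ge i j with h | h
  · exact (List.pairwise_iff_getElem.mp hs) i j (by omega) hj h
  · have : i = j := by omega
    subst this; rfl

-- binary search correctness
lemma bisectGo_spec (s : List Int) (v : Int) (hs : s.Pairwise (· ≤ ·)) (lo hi : Nat)
    (hle : lo ≤ hi) (hhi : hi ≤ s.length)
    (h1 : ∀ j (hj : j < s.length), j < lo → s[j] < v)
    (h2 : ∀ j (hj : j < s.length), hi ≤ j → v ≤ s[j]) :
    bisectGo s v lo hi ≤ s.length ∧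
    (∀ j (hj : j < s.length), j < bisectGo s v lo hi → s[j] < v) ∧
    (∀ j (hj : j < s.length), bisectGo s v lo hi ≤ j → v ≤ s[j]) := by
  revert lo hi
  suffices H : ∀ n lo hi, hi - lo ≤ n → lo ≤ hi → hi ≤ s.length →
      (∀ j (hj : j < s.length), j < lo → s[j] < v) →
      (∀ j (hj : j < s.length), hi ≤ j → v ≤ s[j]) →
      bisectGo s v lo hi ≤ s.length ∧
      (∀ j (hj : j < s.length), j < bisectGo s v lo hi → s[j] < v) ∧
      (∀ j (hj : j < s.length), bisectGo s v lo hi ≤ j → v ≤ s[j]) by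
    exact fun lo hi h1 h2 h3 h4 => H (hi - lo) lo hi le_rfl h1 h2 h3 h4
  intro n
  induction n with
  | zero =>
    intro lo hi hn hle hhi h1 h2
    have heq : ¬ lo < hi := by omega
    rw [bisectGo, if_neg heq]
    exact ⟨by omega, fun j hj hjlo => h1 j hj hjlo, fun j hj hjlo => h2 j hj (by omega)⟩
  | succ n ih =>
    intro lo hi hn hle hhi h1 h2
    by_cases hlo : lo < hi
    · rw [bisectGo, if_pos hlo]
      have hmlt : (lo + hi) / 2 < s.length := by omega
      have hgd : s.getD ((lo + hi) / 2) 0 = s[(lo + hi) / 2] := List.getD_eq_getElem s 0 hmlt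
      by_cases hm : s.getD ((lo + hi) / 2) 0 < v
      · simp only [hm, if_true]
        refine ih ((lo + hi) / 2 + 1) hi (by omega) (by omega) hhi ?_ h2
        intro j hj hjm
        rcases Nat.lt_or_ge j lo with hc | hc
        · exact h1 j hj hc
        · calc s[j] ≤ s[(lo + hi) / 2] := pw_mono hs (by omega) hmlt
            _ < v := by rw [← hgd]; exact hm
      · simp only [hm, if_false]
        refine ih lo ((lo + hi) / 2) (by omega) (by omega) (by omega) h1 ?_
        intro j hj hjm
        calc v ≤ s[(lo + hi) / 2] := by rw [← hgd]; omega
          _ ≤ s[j] := pw_mono hs hjm hj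
    · rw [bisectGo, if_neg hlo]
      exact ⟨by omega, fun j hj hjlo => h1 j hj hjlo, fun j hj hjlo => h2 j hj (by omega)⟩

lemma fm_eq_none (x y : Int) (l : List Int) : fm x y l = none ↔ l = [] := by
  cases l with
  | nil => simp [fm]
  | cons z t =>
    simp only [fm]
    cases h : fm x y t <;> simp <;> split <;> simp

lemma fold_collapse (x y : Int) (l : List Int) : ∀ m,
    l.foldl (stepF x y) m =
      match fm x y l with
      | none => m
      | some w => stepF x y m w := by
  induction l with
  | nil => intro m; rfl
  | cons z t ih =>
    intro m
    simp only [List.foldl_cons, ih (stepF x y m z), fm]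
    cases hft : fm x y t with
    | none => simp
    | some w =>
      simp only []
      by_cases hwz : absDist x y w < absDist x y z
      · rw [if_pos hwz]
        -- stepF (stepF m z) w = stepF m w
        cases m with
        | none =>
          simp only [stepF, d3]
          rw [if_pos hwz]
        | some t0 =>
          simp only [stepF, d3]
          by_cases h1 : absDist x y z < absDist t0.1 t0.2.1 t0.2.2
          · rw [if_pos h1]
            simp only [stepF, d3]
            rw [if_pos hwz, if_pos (by omega)]
          · rw [if_neg h1]
      · rw [if_neg hwz]
        -- stepF (stepF m z) w = stepF m z
        cases m with
        | none =>
          simp only [stepF, d3]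
          rw [if_neg (by omega)]
        | some t0 =>
          simp only [stepF, d3]
          by_cases h1 : absDist x y z < absDist t0.1 t0.2.1 t0.2.2
          · rw [if_pos h1]
            simp only [stepF, d3]
            rw [if_neg (by omega)]
          · rw [if_neg h1]
            simp only [stepF, d3]
            rw [if_neg (by omega)]

lemma fm_first_min (x y : Int) (l : List Int) (hs : l.Pairwise (· ≤ ·)) (v : Int)
    (h : fm x y l = some v) : FirstMin x y l v := by
  induction l generalizing v with
  | nil => simp [fm] at h
  | cons z t ih =>
    rw [List.pairwise_cons] at hs
    obtain ⟨hzt, hst⟩ := hs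
    simp only [fm] at h
    cases hft : fm x y t with
    | none =>
      rw [hft] at h
      simp only [Option.some.injEq] at h
      subst h
      have ht : t = [] := (fm_eq_none x y t).mp hft
      subst ht
      exact ⟨by simp, by intro u hu; simp at hu; subst hu; right; exact ⟨rfl, le_refl _⟩⟩
    | some w =>
      rw [hft] at h
      dsimp only at h
      have hw := ih hst w hft
      obtain ⟨hwmem, hwmin⟩ := hw
      by_cases hcmp : absDist x y w < absDist x y z
      · rw [if_pos hcmp] at h
        simp only [Option.some.injEq] at h
        subst h
        refine ⟨by simp [hwmem], ?_⟩
        intro u hu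
        rcases List.mem_cons.mp hu with hu | hu
        · subst hu; left; exact hcmp
        · exact hwmin u hu
      · rw [if_neg hcmp] at h
        simp only [Option.some.injEq] at h
        subst h
        refine ⟨by simp, ?_⟩
        intro u hu
        rcases List.mem_cons.mp hu with hu | hu
        · subst hu; right; exact ⟨rfl, le_refl _⟩
        · rcases hwmin u hu with h1 | ⟨h1, h1'⟩
          · left; omega
          · by_cases h2 : absDist x y z < absDist x y u
            · left; exact h2
            · right; exact ⟨by omega, hzt u hu⟩

lemma first_min_unique (x y : Int) (s : List Int) (v w : Int)
    (hv : FirstMin x y s v) (hw : FirstMin x y s w) : v = w := by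
  obtain ⟨hvmem, hv⟩ := hv
  obtain ⟨hwmem, hw⟩ := hw
  rcases hv w hwmem with h1 | ⟨h1, h1'⟩ <;> rcases hw v hvmem with h2 | ⟨h2, h2'⟩ <;> omega

lemma bestZ_first_min (x y : Int) (s : List Int) (hs : s.Pairwise (· ≤ ·))
    (hne : s ≠ []) : FirstMin x y s (bestZ x y s) := by
  have hlen : 0 < s.length := List.length_pos_of_ne_nil hne
  unfold bestZ bisectLeft
  set lo := if x ≤ y then x else y with hlodef
  set hi := if x ≤ y then y else x with hhidef
  have hlohi : lo ≤ hi := by rw [hlodef, hhidef]; split_ifs <;> omega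
  have hmin : ∀ z : Int, lo ≤ z → x ≤ z ∨ y ≤ z := by
    intro z; rw [hlodef]; split_ifs <;> omega
  have hminrev : ∀ z : Int, (x ≤ z ∨ y ≤ z) → lo ≤ z := by
    intro z; rw [hlodef]; split_ifs <;> omega
  have hmax : ∀ z : Int, z ≤ hi → z ≤ x ∨ z ≤ y := by
    intro z; rw [hhidef]; split_ifs <;> omega
  have hbelow : ∀ z : Int, z < lo → z ≤ x ∧ z ≤ y := by
    intro z; rw [hlodef]; split_ifs <;> omega
  have habove : ∀ z : Int, hi < z → x ≤ z ∧ y ≤ z := by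
    intro z; rw [hhidef]; split_ifs <;> omega
  obtain ⟨hple, hbp, hap⟩ :=
    bisectGo_spec s lo hs 0 s.length (by omega) le_rfl
      (fun j hj hc => absurd hc (by omega)) (fun j hj hc => absurd hj (by omega))
  set p := bisectGo s lo 0 s.length with hpdef
  by_cases hc1 : p < s.length ∧ s.getD p 0 ≤ hi
  · rw [if_pos hc1]
    obtain ⟨hplt, hphi⟩ := hc1
    rw [List.getD_eq_getElem s 0 hplt] at hphi ⊢
    refine ⟨List.getElem_mem hplt, ?_⟩
    intro u hu
    have hvlo : lo ≤ s[p] := hap p hplt le_rfl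
    have hle := region_min x y s[p] u (hmin _ hvlo) (hmax _ hphi)
    by_cases heq : absDist x y s[p] < absDist x y u
    · exact Or.inl heq
    · refine Or.inr ⟨by omega, ?_⟩
      have hulo : lo ≤ u := hminrev u (region_eq x y s[p] u (hmin _ hvlo) (hmax _ hphi) (by omega)).1
      obtain ⟨ju, hju, hjueq⟩ := List.getElem_of_mem hu
      rcases Nat.lt_or_ge ju p with hc | hc
      · exact absurd (hbp ju hju hc) (by rw [hjueq]; omega)
      · rw [← hjueq]; exact pw_mono hs hc hju
  · rw [if_neg hc1]
    by_cases hp2 : p = s.length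
    · rw [if_pos hp2]
      have hlast : s.length - 1 < s.length := by omega
      rw [List.getD_eq_getElem s 0 hlast]
      refine ⟨List.getElem_mem hlast, ?_⟩
      have hvlo : s[s.length - 1] < lo := hbp _ hlast (by omega)
      intro u hu
      obtain ⟨ju, hju, hjueq⟩ := List.getElem_of_mem hu
      have huv : u ≤ s[s.length - 1] := by rw [← hjueq]; exact pw_mono hs (by omega) hlast
      rcases lt_or_eq_of_le huv with hlt | heq
      · exact Or.inl (f_lt_below x y u s[s.length - 1] hlt (hbelow _ hvlo).1 (hbelow _ hvlo).2)
      · exact Or.inr ⟨by rw [heq], by omega⟩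
    · rw [if_neg hp2]
      have hplt : p < s.length := by omega
      have hzrhi : hi < s[p] := by
        rw [List.getD_eq_getElem s 0 hplt] at hc1
        by_contra hc
        exact hc1 ⟨hplt, by omega⟩
      by_cases hp0 : p = 0
      · rw [if_pos hp0]
        have h0 : 0 < s.length := hlen
        rw [List.getD_eq_getElem s 0 h0]
        refine ⟨List.getElem_mem h0, ?_⟩
        have hv : hi < s[0] := by simp only [hp0] at hzrhi; exact hzrhi
        intro u hu
        obtain ⟨ju, hju, hjueq⟩ := List.getElem_of_mem hu
        have huv : s[0] ≤ u := by rw [← hjueq]; exact pw_mono hs (by omega) hju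
        rcases lt_or_eq_of_le huv with hlt | heq
        · exact Or.inl (f_lt_above x y s[0] u hlt (habove _ hv).1 (habove _ hv).2)
        · exact Or.inr ⟨by rw [heq], by omega⟩
      · rw [if_neg hp0]
        have hpm : p - 1 < s.length := by omega
        rw [List.getD_eq_getElem s 0 hpm, List.getD_eq_getElem s 0 hplt]
        have hzl : s[p - 1] < lo := hbp _ hpm (by omega)
        have hzz : s[p - 1] ≤ s[p] := pw_mono hs (by omega) hplt
        -- comparisons of any element of s with zl (left side) and zr (right side)
        have hleft : ∀ (ju : Nat) (hju : ju < s.length), ju < p →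
            absDist x y s[p - 1] < absDist x y s[ju] ∨
              (absDist x y s[p - 1] = absDist x y s[ju] ∧ s[ju] = s[p - 1]) := by
          intro ju hju hjp
          have h1 : s[ju] ≤ s[p - 1] := pw_mono hs (by omega) hpm
          rcases lt_or_eq_of_le h1 with hlt | heq
          · exact Or.inl (f_lt_below x y s[ju] s[p - 1] hlt (hbelow _ hzl).1 (hbelow _ hzl).2)
          · exact Or.inr ⟨by rw [heq], heq⟩
        have hright : ∀ (ju : Nat) (hju : ju < s.length), p ≤ ju →
            absDist x y s[p] < absDist x y s[ju] ∨
              (absDist x y s[p] = absDist x y s[ju] ∧ s[ju] = s[p]) := by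
          intro ju hju hjp
          have h1 : s[p] ≤ s[ju] := pw_mono hs hjp hju
          rcases lt_or_eq_of_le h1 with hlt | heq
          · exact Or.inl (f_lt_above x y s[p] s[ju] hlt (habove _ hzrhi).1 (habove _ hzrhi).2)
          · exact Or.inr ⟨by rw [heq], heq.symm⟩
        by_cases hcmp : absDist x y s[p - 1] ≤ absDist x y s[p]
        · rw [if_pos hcmp]
          refine ⟨List.getElem_mem hpm, ?_⟩
          intro u hu
          obtain ⟨ju, hju, hjueq⟩ := List.getElem_of_mem hu
          subst hjueq
          rcases Nat.lt_or_ge ju p with hc | hc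
          · rcases hleft ju hju hc with h | ⟨h, h'⟩
            · exact Or.inl h
            · exact Or.inr ⟨h, by omega⟩
          · rcases hright ju hju hc with h | ⟨h, h'⟩
            · exact Or.inl (by omega)
            · by_cases hq : absDist x y s[p - 1] < absDist x y s[ju]
              · exact Or.inl hq
              · exact Or.inr ⟨by omega, by omega⟩
        · rw [if_neg hcmp]
          refine ⟨List.getElem_mem hplt, ?_⟩
          intro u hu
          obtain ⟨ju, hju, hjueq⟩ := List.getElem_of_mem hu
          subst hjueq
          rcases Nat.lt_or_ge ju p with hc | hc
          · rcases hleft ju hju hc with h | ⟨h, h'⟩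
            · exact Or.inl (by omega)
            · exact Or.inl (by omega)
          · rcases hright ju hju hc with h | ⟨h, h'⟩
            · exact Or.inl h
            · exact Or.inr ⟨h, by omega⟩

lemma foldl_no_update (x y : Int) (t : Int × Int × Int) (l : List Int)
    (h : ∀ z ∈ l, ¬ absDist x y z < d3 t) : l.foldl (stepF x y) (some t) = some t := by
  induction l with
  | nil => rfl
  | cons z t ih =>
    have hz := h z (by simp)
    simp only [List.foldl_cons, stepF, if_neg hz]
    exact ih (fun u hu => h u (by simp [hu]))

lemma innerA_eq_fold (x y : Int) (s : List Int) (hs : s.Pairwise (· ≤ ·)) (i : Nat)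
    (m : Option (Int × Int × Int)) :
    innerA x y s i m = (s.drop i).foldl (stepF x y) m := by
  revert i m
  suffices H : ∀ n i m, s.length - i ≤ n → innerA x y s i m = (s.drop i).foldl (stepF x y) m by
    exact fun i m => H (s.length - i) i m le_rfl
  intro n
  induction n with
  | zero =>
    intro i m hle
    have hge : s.length ≤ i := by omega
    rw [innerA, dif_neg (by omega), List.drop_of_length_le hge, List.foldl_nil]
  | succ n ih =>
    intro i m hle
    by_cases hi : i < s.length
    · rw [innerA, dif_pos hi]
      have hdrop : s.drop i = s[i] :: s.drop (i + 1) := List.drop_eq_getElem_cons hi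
      rw [hdrop, List.foldl_cons]
      cases m with
      | none =>
        simp only []
        rw [ih (i + 1) (some (x, y, s[i])) (by omega)]
        rfl
      | some t =>
        simp only []
        by_cases hlt : absDist x y s[i] < absDist t.1 t.2.1 t.2.2
        · rw [if_pos hlt, ih (i + 1) _ (by omega)]
          have hstep : stepF x y (some t) s[i] = some (x, y, s[i]) := by
            simp [stepF, d3, hlt]
          rw [hstep]
        · rw [if_neg hlt]
          have hstep : stepF x y (some t) s[i] = some t := by simp [stepF, d3, hlt]
          by_cases hbr : 0 < i ∧ absDist x y (s.getD (i - 1) 0) < absDist x y s[i]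
          · rw [if_pos hbr, hstep]
            refine (foldl_no_update x y t _ ?_).symm
            intro z hz
            obtain ⟨k, hk, hzk⟩ := List.getElem_of_mem hz
            rw [List.getElem_drop] at hzk
            have hk' : i + 1 + k < s.length := by
              have h := List.length_drop (i := i + 1) (l := s); omega
            have hprev : i - 1 < s.length := by omega
            rw [List.getD_eq_getElem s 0 hprev] at hbr
            have h1 : s[i - 1] ≤ s[i] := pw_mono hs (by omega) hi
            have h2 : s[i] ≤ s[i + 1 + k] := pw_mono hs (by omega) hk'
            have h3 := conv3 x y s[i - 1] s[i] s[i + 1 + k] h1 h2 hbr.2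
            rw [← hzk]
            simp only [d3] at *
            omega
          · rw [if_neg hbr, ih (i + 1) _ (by omega), hstep]
    · rw [innerA, dif_neg hi, List.drop_of_length_le (by omega), List.foldl_nil]

lemma innerA_eq_best (x y : Int) (s : List Int) (hs : s.Pairwise (· ≤ ·))
    (m : Option (Int × Int × Int)) :
    innerA x y s 0 m = if s = [] then m else stepF x y m (bestZ x y s) := by
  rw [innerA_eq_fold x y s hs 0 m, List.drop_zero, fold_collapse]
  by_cases hne : s = []
  · subst hne; simp [fm]
  · rw [if_neg hne]
    cases hf : fm x y s with
    | none => exact absurd ((fm_eq_none x y s).mp hf) hne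
    | some w =>
      dsimp only
      rw [first_min_unique x y s w (bestZ x y s) (fm_first_min x y s hs w hf)
        (bestZ_first_min x y s hs hne)]

lemma foldl_flatMap_pairs (a1 a2 : List Int)
    (g : Option (Int × Int × Int) → Int × Int → Option (Int × Int × Int))
    (m : Option (Int × Int × Int)) :
    (a1.flatMap (fun x => a2.map (fun y => (x, y)))).foldl g m =
      a1.foldl (fun m x => a2.foldl (fun m y => g m (x, y)) m) m := by
  induction a1 generalizing m with
  | nil => rfl
  | cons x t ih =>
    simp only [List.flatMap_cons, List.foldl_append, List.foldl_cons, List.foldl_map]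
    exact ih _

lemma foldl_id {α β : Type} (l : List α) (m : β) : l.foldl (fun m _ => m) m = m := by
  induction l with
  | nil => rfl
  | cons a t ih => simp only [List.foldl_cons]; exact ih


-- ===== VERDICT (by name: the statement is the Claim_ definition above) =====
theorem optimised_min_spec : Claim_equal_optimised_min := by
  intro a1 a2 a3 _
  unfold Spec_optimised_min optimised_min optimised_min_alt
  have hs : (PySem.List.sorted a3 (fun z => z) false).Pairwise (· ≤ ·) :=
    PySem.List.sorted_pairwise a3 (fun z => z)
  set s := PySem.List.sorted a3 (fun z => z) false with hsdef
  simp only []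
  congr 1
  rw [foldl_flatMap_pairs]
  by_cases hne : s = []
  · rw [if_pos hne]
    calc a1.foldl (fun m x => a2.foldl (fun m y => innerA x y s 0 m) m) none
        = a1.foldl (fun m _ => m) none := by
          apply PySem.List.foldl_congr_mem; intro m x _
          apply Eq.trans _ (foldl_id a2 m)
          apply PySem.List.foldl_congr_mem; intro m' y _
          rw [innerA_eq_best x y s hs m', if_pos hne]
      _ = none := foldl_id a1 none
  · rw [if_neg hne]
    apply PySem.List.foldl_congr_mem; intro m x _
    apply PySem.List.foldl_congr_mem; intro m' y _
    rw [innerA_eq_best x y s hs m', if_neg hne]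
    rfl
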